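-- pv_equiv track=rewrite | github.com/baimukashev/reward-learning | src/util/helper.py | divide_1d_array_into_chunks
-- ===== SOURCE A (Python) =====
-- def divide_1d_array_into_chunks(data_array, time_indexes, num_chunks):
--     """
--     Divide a 1D array into chunks based on sequential time indexes.
--
--     Parameters:
--     - data_array: The 1D array of shape (N,).
--     - time_indexes: The array representing sequential time indexes for each point.
--
--     Returns:
--     - chunks: A list of chunks, where each chunk is a 1D array.
--     """
--     chunks = []
--     start_index = 0
--     counter = 0
--     for i in range(1, len(time_indexes)):
--         if time_indexes[i] < time_indexes[i - 1]:
--             # If the time index resets, create a new chunk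
--             chunks.append(data_array[start_index:i])
--             counter += 1
--             if counter == num_chunks:
--                 break
--             start_index = i
--
--     # Add the last chunk
--     if counter < num_chunks:
--         chunks.append(data_array[start_index:])
--     return chunks
-- ===== SOURCE B (Python) =====
-- def divide_1d_array_into_chunks(data_array, time_indexes, num_chunks):
--     # Different algorithm: run-length encode the maximal non-decreasing runs of
--     # time_indexes, then consume data_array once via an iterator, taking a prefix
--     # of each run length as a chunk (no index arithmetic on data_array at all).
--     runs = []
--     prev = 0
--     for t in time_indexes:
--         if runs and prev <= t:
--             runs[-1] += 1
--         else:
--             runs.append(1)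
--         prev = t
--     chunks = []
--     it = iter(data_array)
--     for n in runs[:-1]:
--         chunks.append([x for _, x in zip(range(n), it)])
--         if len(chunks) == num_chunks:
--             return chunks
--     if len(chunks) < num_chunks:
--         chunks.append(list(it))
--     return chunks
-- ===== Notes on version B (the rewrite author's own statement) =====
-- stated objective: alternative
-- what changed: Instead of scanning indices and slicing data_array at reset positions, B run-length encodes time_indexes into the lengths of its maximal non-decreasing runs and then consumes data_array by repeatedly peeling a prefix of each run length, with no index arithmetic on data_array at all.
import Mathlib
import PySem

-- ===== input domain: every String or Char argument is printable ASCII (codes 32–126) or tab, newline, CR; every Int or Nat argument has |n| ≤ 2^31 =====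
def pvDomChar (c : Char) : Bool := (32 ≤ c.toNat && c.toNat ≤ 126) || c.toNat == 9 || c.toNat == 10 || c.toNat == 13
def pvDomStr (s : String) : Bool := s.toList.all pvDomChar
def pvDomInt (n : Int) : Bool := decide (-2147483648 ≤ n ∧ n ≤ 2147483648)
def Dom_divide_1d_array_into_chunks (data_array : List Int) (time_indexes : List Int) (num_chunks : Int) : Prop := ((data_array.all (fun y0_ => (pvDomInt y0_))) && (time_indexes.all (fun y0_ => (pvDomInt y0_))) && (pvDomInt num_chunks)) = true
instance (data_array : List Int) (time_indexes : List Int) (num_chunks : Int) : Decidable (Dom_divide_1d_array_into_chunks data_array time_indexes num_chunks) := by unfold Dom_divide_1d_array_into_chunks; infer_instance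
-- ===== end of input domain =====

-- B replaces A's index scan with inline slicing by a run-length encoding of time_indexes'
-- maximal non-decreasing runs followed by peeling prefixes of data_array (objective: alternative).

-- ===== PORT A =====
-- loop body of A's for-loop (state: chunks, start_index, counter, broken-out-of-loop flag)
def pvStepA (data_array : List Int) (time_indexes : List Int) (num_chunks : Int)
    (s : List (List Int) × Int × Int × Bool) (i : Int) : List (List Int) × Int × Int × Bool :=
  match s with
  | (chunks, start_index, counter, broken) =>
    if broken then (chunks, start_index, counter, broken)
    else if PySem.List.pyGetD time_indexes i 0 < PySem.List.pyGetD time_indexes (i - 1) 0 then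
      if counter + 1 = num_chunks then
        (chunks ++ [PySem.List.slice data_array (some start_index) (some i)], start_index, counter + 1, true)
      else
        (chunks ++ [PySem.List.slice data_array (some start_index) (some i)], i, counter + 1, false)
    else (chunks, start_index, counter, broken)

def divide_1d_array_into_chunks (data_array : List Int) (time_indexes : List Int) (num_chunks : Int) : List (List Int) :=
  let st := (PySem.List.pyRange 1 (time_indexes.length : Int) 1).foldl
    (pvStepA data_array time_indexes num_chunks) ([], 0, 0, false)
  if st.2.2.1 < num_chunks then st.1 ++ [PySem.List.slice data_array (some st.2.1) none]
  else st.1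

-- ===== PORT B =====
-- 'runs[-1] += 1' on a nonempty list
def pvBump : List Int → List Int
  | [] => []
  | [x] => [x + 1]
  | x :: y :: xs => x :: pvBump (y :: xs)

-- body of B's first loop (state: runs, prev)
def pvRunStep (s : List Int × Int) (t : Int) : List Int × Int :=
  if s.1 ≠ [] ∧ s.2 ≤ t then (pvBump s.1, t) else (s.1 ++ [1], t)

-- B's second loop ('for n in runs[:-1]'); 'rest' models the iterator's unread suffix:
-- zip(range(n), it) takes the next n.toNat elements, list(it) is the whole remainder
def pvConsume (num_chunks : Int) : List Int → List (List Int) → List Int → List (List Int)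
  | [], chunks, rest =>
      if (chunks.length : Int) < num_chunks then chunks ++ [rest] else chunks
  | n :: ns, chunks, rest =>
      let chunks' := chunks ++ [rest.take n.toNat]
      if (chunks'.length : Int) = num_chunks then chunks'
      else pvConsume num_chunks ns chunks' (rest.drop n.toNat)

def divide_1d_array_into_chunks_alt (data_array : List Int) (time_indexes : List Int) (num_chunks : Int) : List (List Int) :=
  let runs := (time_indexes.foldl pvRunStep ([], 0)).1
  pvConsume num_chunks (PySem.List.slice runs none (some (-1))) [] data_array

-- ===== PRECONDITION & SPEC =====
def Spec_divide_1d_array_into_chunks (data_array : List Int) (time_indexes : List Int) (num_chunks : Int) (out : List (List Int)) : Prop := out = divide_1d_array_into_chunks_alt data_array time_indexes num_chunks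
instance (data_array : List Int) (time_indexes : List Int) (num_chunks : Int) (out : List (List Int)) : Decidable (Spec_divide_1d_array_into_chunks data_array time_indexes num_chunks out) := by unfold Spec_divide_1d_array_into_chunks; infer_instance

-- ===== CLAIM (what is proved, stated in full; the proofs are below) =====
def Claim_equal_divide_1d_array_into_chunks : Prop := ∀ (data_array : List Int) (time_indexes : List Int) (num_chunks : Int), Dom_divide_1d_array_into_chunks data_array time_indexes num_chunks → Spec_divide_1d_array_into_chunks data_array time_indexes num_chunks (divide_1d_array_into_chunks data_array time_indexes num_chunks)

-- ===== LEMMAS AND PROOFS =====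

-- structural form of A's loop: walk the tail of time_indexes carrying (prev value, index)
def pvARec (data_array : List Int) (num_chunks : Int) :
    List Int → Int → Int → (List (List Int) × Int × Int × Bool) → (List (List Int) × Int × Int × Bool)
  | [], _, _, s => s
  | t :: ts, prev, i, s =>
      pvARec data_array num_chunks ts t (i + 1) <|
        match s with
        | (chunks, start_index, counter, broken) =>
          if broken then (chunks, start_index, counter, broken)
          else if t < prev then
            if counter + 1 = num_chunks then
              (chunks ++ [PySem.List.slice data_array (some start_index) (some i)], start_index, counter + 1, true)
            else
              (chunks ++ [PySem.List.slice data_array (some start_index) (some i)], i, counter + 1, false)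
          else (chunks, start_index, counter, broken)

-- run-length encoding of the maximal non-decreasing runs, structurally
def pvRunsAux (prev c : Int) : List Int → List Int
  | [] => [c]
  | t :: ts => if prev ≤ t then pvRunsAux t (c + 1) ts else c :: pvRunsAux t 1 ts

theorem pvRunsAux_ne_nil (prev c : Int) (ts : List Int) : pvRunsAux prev c ts ≠ [] := by
  cases ts with
  | nil => simp [pvRunsAux]
  | cons t ts => simp only [pvRunsAux]; split <;> simp [pvRunsAux_ne_nil]

theorem pvBump_append (l : List Int) (c : Int) : pvBump (l ++ [c]) = l ++ [c + 1] := by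
  induction l with
  | nil => rfl
  | cons a l ih =>
    cases l with
    | nil => rfl
    | cons b l => simpa [pvBump] using ih

-- B's runs fold computes pvRunsAux
theorem pvRuns_eq (ts : List Int) : ∀ (runs0 : List Int) (c prev : Int),
    (ts.foldl pvRunStep (runs0 ++ [c], prev)).1 = runs0 ++ pvRunsAux prev c ts := by
  induction ts with
  | nil => intro runs0 c prev; simp [pvRunsAux]
  | cons t ts ih =>
    intro runs0 c prev
    by_cases h : prev ≤ t
    · simp [List.foldl, pvRunStep, h, pvBump_append, pvRunsAux, ih]
    · simp only [List.foldl, pvRunStep, h, and_false, if_false, pvRunsAux]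
      have := ih (runs0 ++ [c]) 1 t
      simpa [List.append_assoc] using this

-- A's indexed fold over pyRange equals the structural walk pvARec
theorem pvA_reindex (data_array time_indexes : List Int) (num_chunks : Int) :
    ∀ (rest : List Int) (j : Nat) (prev : Int) (s : List (List Int) × Int × Int × Bool),
      time_indexes.drop j = prev :: rest →
      (PySem.List.pyRange ((j : Int) + 1) (time_indexes.length : Int) 1).foldl
        (pvStepA data_array time_indexes num_chunks) s
        = pvARec data_array num_chunks rest prev ((j : Int) + 1) s := by
  intro rest
  induction rest with
  | nil =>
    intro j prev s hd
    have hlen : time_indexes.length = j + 1 := by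
      have := congrArg List.length hd
      simp at this
      omega
    rw [PySem.List.pyRange_one_eq_nil (by omega)]
    rfl
  | cons t rest ih =>
    intro j prev s hd
    have hlen : j + 1 < time_indexes.length := by
      have := congrArg List.length hd
      simp at this
      omega
    have hd' : time_indexes.drop (j + 1) = t :: rest := by
      have : (time_indexes.drop j).drop 1 = time_indexes.drop (j + 1) := by
        rw [List.drop_drop]
      rw [← this, hd]; rfl
    have hj : time_indexes[j]? = some prev := by
      have := congrArg (fun l : List Int => l[0]?) hd
      simpa using this
    have hj1 : time_indexes[j + 1]? = some t := by
      have := congrArg (fun l : List Int => l[0]?) hd'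
      simpa using this
    rw [PySem.List.pyRange_one_cons (by exact_mod_cast hlen), List.foldl_cons]
    have hget1 : PySem.List.pyGetD time_indexes ((j : Int) + 1) 0 = t := by
      rw [show ((j : Int) + 1) = ((j + 1 : Nat) : Int) by push_cast; ring,
        PySem.List.pyGetD_natCast]
      simp [hj1]
    have hget0 : PySem.List.pyGetD time_indexes ((j : Int) + 1 - 1) 0 = prev := by
      rw [show ((j : Int) + 1 - 1) = ((j : Nat) : Int) by ring, PySem.List.pyGetD_natCast]
      simp [hj]
    have H : ∀ s', (PySem.List.pyRange ((j : Int) + 1 + 1) (time_indexes.length : Int) 1).foldl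
        (pvStepA data_array time_indexes num_chunks) s'
          = pvARec data_array num_chunks rest t ((j : Int) + 1 + 1) s' := by
      intro s'
      have := ih (j + 1) t s' hd'
      push_cast at this
      exact this
    rw [H]
    rcases s with ⟨chunks, start, counter, broken⟩
    simp only [pvARec, pvStepA, hget0, hget1]

-- once broken, pvARec leaves the state unchanged
theorem pvARec_broken (data_array : List Int) (num_chunks : Int) :
    ∀ (ts : List Int) (prev i : Int) (chunks : List (List Int)) (start counter : Int),
      pvARec data_array num_chunks ts prev i (chunks, start, counter, true)
        = (chunks, start, counter, true) := by
  intro ts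
  induction ts with
  | nil => intro prev i chunks start counter; rfl
  | cons t ts ih => intro prev i chunks start counter; simp [pvARec, ih]

-- bridge: A's data_array[start:start+c] is the next c elements of B's iterator
theorem pv_slice_split (data_array : List Int) (start c : Int) (h0 : 0 ≤ start) (h1 : 0 ≤ c) :
    (data_array.drop start.toNat).take c.toNat
      = PySem.List.slice data_array (some start) (some (start + c)) := by
  rw [PySem.List.slice_toNat _ h0 (by omega)]
  congr 1
  omega

-- MAIN INVARIANT: A's structural walk plus its tail-append equals B's consume pass
theorem pv_main (data_array : List Int) (num_chunks : Int) :
    ∀ (ts : List Int) (prev start c : Int) (chunks : List (List Int)),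
      0 ≤ start → 0 ≤ c →
      (let s := pvARec data_array num_chunks ts prev (start + c)
        (chunks, start, (chunks.length : Int), false)
       if s.2.2.1 < num_chunks then s.1 ++ [PySem.List.slice data_array (some s.2.1) none]
       else s.1)
        = pvConsume num_chunks ((pvRunsAux prev c ts).dropLast) chunks (data_array.drop start.toNat) := by
  intro ts
  induction ts with
  | nil =>
    intro prev start c chunks h0 _hc
    simp only [pvARec, pvRunsAux, List.dropLast_singleton, pvConsume]
    rw [PySem.List.slice_from _ h0]
  | cons t ts ih =>
    intro prev start c chunks h0 hc
    by_cases h : prev ≤ t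
    · -- run continues: A does nothing at this step, B's run grows
      have hA : pvARec data_array num_chunks (t :: ts) prev (start + c)
          (chunks, start, (chunks.length : Int), false)
          = pvARec data_array num_chunks ts t (start + (c + 1))
            (chunks, start, (chunks.length : Int), false) := by
        simp only [pvARec, if_neg (by omega : ¬ t < prev), Bool.false_eq_true, if_false]
        congr 1
        omega
      simp only [pvRunsAux, if_pos h, hA]
      exact ih t start (c + 1) chunks h0 (by omega)
    · -- reset: A appends data_array[start:start+c], B peels a prefix of length c
      have ht : t < prev := by omega
      have hdl : (pvRunsAux prev c (t :: ts)).dropLast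
          = c :: (pvRunsAux t 1 ts).dropLast := by
        simp only [pvRunsAux, if_neg h]
        exact List.dropLast_cons_of_ne_nil (pvRunsAux_ne_nil t 1 ts)
      have hslice : (data_array.drop start.toNat).take c.toNat
          = PySem.List.slice data_array (some start) (some (start + c)) :=
        pv_slice_split data_array start c h0 hc
      by_cases hn : (chunks.length : Int) + 1 = num_chunks
      · -- A breaks, B returns early
        simp only [pvARec, Bool.false_eq_true, if_false, if_pos ht, if_pos hn, pvARec_broken]
        rw [hdl]
        simp only [pvConsume, hslice, List.length_append, List.length_cons,
          List.length_nil, Nat.cast_add, Nat.cast_one, Nat.cast_zero, zero_add]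
        rw [if_pos hn, if_neg (by omega : ¬ (chunks.length : Int) + 1 < num_chunks)]
      · -- both continue with the next run
        simp only [pvARec, Bool.false_eq_true, if_false, if_pos ht, if_neg hn]
        rw [hdl]
        simp only [pvConsume, hslice, List.length_append, List.length_cons,
          List.length_nil, Nat.cast_add, Nat.cast_one, Nat.cast_zero, zero_add]
        rw [if_neg hn]
        have hrest : (data_array.drop start.toNat).drop c.toNat
            = data_array.drop (start + c).toNat := by
          rw [List.drop_drop]
          congr 1
          omega
        rw [hrest]
        have := ih t (start + c) 1
          (chunks ++ [PySem.List.slice data_array (some start) (some (start + c))])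
          (by omega) (by omega)
        simp only [List.length_append, List.length_cons, List.length_nil, Nat.cast_add,
          Nat.cast_one, zero_add] at this
        rw [show start + c + 1 = (start + c) + 1 by ring] at this
        exact this

-- ===== VERDICT (by name: the statement is the Claim_ definition above) =====
theorem divide_1d_array_into_chunks_spec : Claim_equal_divide_1d_array_into_chunks := by
  intro data_array time_indexes num_chunks _hdom
  unfold Spec_divide_1d_array_into_chunks divide_1d_array_into_chunks divide_1d_array_into_chunks_alt
  cases htm : time_indexes with
  | nil =>
    simp only [List.length_nil, Nat.cast_zero, PySem.List.pyRange_one_eq_nil (by omega : (0:Int) ≤ 1),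
      List.foldl_nil, List.foldl]
    rw [PySem.List.slice_to_neg_one]
    simp [pvConsume, PySem.List.slice_none_none]
  | cons t ts =>
    have hd0 : (t :: ts).drop 0 = t :: ts := rfl
    have hA := pvA_reindex data_array (t :: ts) num_chunks ts 0 t ([], 0, 0, false) hd0
    simp only [Nat.cast_zero, zero_add] at hA
    rw [hA]
    -- B side: runs = pvRunsAux t 1 ts
    have hB : ((t :: ts).foldl pvRunStep ([], 0)).1 = pvRunsAux t 1 ts := by
      have h1 : pvRunStep ([], 0) t = ([] ++ [1], t) := by simp [pvRunStep]
      rw [List.foldl_cons, h1, pvRuns_eq]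
      simp
    rw [hB]
    simp only [PySem.List.slice_to_neg_one]
    have := pv_main data_array num_chunks ts t 0 1 [] (by omega) (by omega)
    simp only [List.length_nil, Nat.cast_zero, zero_add] at this
    exact this
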